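-- pv_equiv track=rewrite | github.com/yangguoquan001/mahjong_shanten_count | utils.py | process_hand_tiles
-- ===== SOURCE A (Python) =====
-- from collections import defaultdict
--
-- def process_hand_tiles(hand_tiles):
--     result = defaultdict(list)
--     for i in range(0, len(hand_tiles), 2):
--         cls = hand_tiles[i+1]
--         num = hand_tiles[i]
--         if num == '0':
--             num = 5
--         result[cls].append(int(num))
--     for cls, nums in result.items():
--         result[cls] = sorted(nums)
--     return result
-- ===== SOURCE B (Python) =====
-- from collections import defaultdict
--
-- def process_hand_tiles(hand_tiles):
--     pairs = []
--     for i in range(0, len(hand_tiles), 2):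
--         num = hand_tiles[i]
--         pairs.append((hand_tiles[i + 1], 5 if num == '0' else int(num)))
--     result = defaultdict(list, {cls: [] for cls, _ in pairs})
--     for cls, num in sorted(pairs, key=lambda p: p[1]):
--         result[cls].append(num)
--     return result
-- ===== Notes on version B (the rewrite author's own statement) =====
-- stated objective: alternative
-- what changed: B parses the string once into a flat (class, number) pair list, does ONE global stable sort of that list by number, and fills each class bucket already in ascending order in a single grouping pass, instead of A's group-first-then-sort-every-bucket scheme.
import Mathlib
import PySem

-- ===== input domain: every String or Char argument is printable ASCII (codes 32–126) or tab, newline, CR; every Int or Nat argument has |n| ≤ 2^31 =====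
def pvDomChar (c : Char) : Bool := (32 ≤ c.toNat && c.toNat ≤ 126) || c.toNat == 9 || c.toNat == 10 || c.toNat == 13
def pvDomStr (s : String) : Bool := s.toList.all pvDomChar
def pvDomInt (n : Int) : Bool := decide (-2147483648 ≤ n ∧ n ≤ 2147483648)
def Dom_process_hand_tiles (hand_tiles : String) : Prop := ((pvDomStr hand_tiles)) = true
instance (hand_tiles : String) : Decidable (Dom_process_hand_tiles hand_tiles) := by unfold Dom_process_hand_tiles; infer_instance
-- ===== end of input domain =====

-- B replaces A's "group, then sort every bucket" by "one global stable sort by number, then one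
-- already-in-order grouping pass" (objective: alternative decomposition, same asymptotic cost).

-- ===== PORT A =====
def process_hand_tiles (hand_tiles : String) : List (String × List Int) :=
  let cs := hand_tiles.toList
  -- for i in range(0, len(hand_tiles), 2): result[cls].append(int(num))  (defaultdict ⇒ Dict.modify with default [])
  let result : PySem.Dict String (List Int) :=
    (PySem.List.pyRange 0 cs.length 2).foldl
      (fun d i =>
        let cls := String.mk [(PySem.List.pyGet? cs (i + 1)).getD ' ']
        let num := (PySem.List.pyGet? cs i).getD ' '
        let v : Int := if num = '0' then 5 else (PySem.Int.ofStr? (String.mk [num])).getD 0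
        d.modify cls [] (· ++ [v]))
      PySem.Dict.empty
  -- for cls, nums in result.items(): result[cls] = sorted(nums)
  let result2 := result.items.foldl
    (fun d p => d.insert p.1 (PySem.List.sorted p.2 (fun x => x) false)) result
  result2.items

-- ===== PORT B =====
def process_hand_tiles_alt (hand_tiles : String) : List (String × List Int) :=
  let cs := hand_tiles.toList
  -- pairs = [...] built by an explicit loop
  let pairs : List (String × Int) :=
    (PySem.List.pyRange 0 cs.length 2).foldl
      (fun acc i =>
        let num := (PySem.List.pyGet? cs i).getD ' '
        acc ++ [(String.mk [(PySem.List.pyGet? cs (i + 1)).getD ' '],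
                 if num = '0' then (5 : Int) else (PySem.Int.ofStr? (String.mk [num])).getD 0)])
      []
  -- result = defaultdict(list, {cls: [] for cls, _ in pairs})
  let init : PySem.Dict String (List Int) :=
    pairs.foldl (fun d p => d.insert p.1 ([] : List Int)) PySem.Dict.empty
  -- for cls, num in sorted(pairs, key=lambda p: p[1]): result[cls].append(num)
  let result := (PySem.List.sorted pairs (fun p => p.2) false).foldl
    (fun d p => d.modify p.1 [] (· ++ [p.2])) init
  result.items

-- ===== PRECONDITION & SPEC =====
-- Pre_ excludes exactly the inputs on which A raises: an odd-length string (IndexError on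
-- hand_tiles[i+1]) or a non-digit character at an even index (ValueError from int(num)).
def Pre_process_hand_tiles (hand_tiles : String) : Prop :=
  hand_tiles.toList.length % 2 = 0 ∧
  hand_tiles.toList.zipIdx.all (fun p => p.2 % 2 = 1 || p.1.isDigit) = true
instance (hand_tiles : String) : Decidable (Pre_process_hand_tiles hand_tiles) := by
  unfold Pre_process_hand_tiles; infer_instance
def pvWitness_process_hand_tiles : String := "1m0p3z1m"

def Spec_process_hand_tiles (hand_tiles : String) (out : List (String × List Int)) : Prop := out = process_hand_tiles_alt hand_tiles
instance (hand_tiles : String) (out : List (String × List Int)) : Decidable (Spec_process_hand_tiles hand_tiles out) := by unfold Spec_process_hand_tiles; infer_instance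

-- ===== CLAIM (what is proved, stated in full; the proofs are below) =====
def Claim_equal_process_hand_tiles : Prop := ∀ (hand_tiles : String), Dom_process_hand_tiles hand_tiles → Pre_process_hand_tiles hand_tiles → Spec_process_hand_tiles hand_tiles (process_hand_tiles hand_tiles)

-- ===== LEMMAS AND PROOFS =====

-- the per-tile parse, shared (definitionally) by both ports' loop bodies
def pvF (cs : List Char) (i : Int) : String × Int :=
  (String.mk [(PySem.List.pyGet? cs (i + 1)).getD ' '],
   if (PySem.List.pyGet? cs i).getD ' ' = '0' then (5 : Int)
   else (PySem.Int.ofStr? (String.mk [(PySem.List.pyGet? cs i).getD ' '])).getD 0)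

theorem pv_foldl_push {α β : Type} (f : α → β) :
    ∀ (l : List α) (acc : List β), l.foldl (fun a i => a ++ [f i]) acc = acc ++ l.map f := by
  intro l
  induction l with
  | nil => simp
  | cons x xs ih => intro acc; simp [List.foldl_cons, ih]

theorem pv_update_self {κ : Type} [BEq κ] [LawfulBEq κ] (s t : List κ)
    (h : ∀ x ∈ t, x ∈ s) : PySem.Set.update s t = s := by
  rw [PySem.Set.update_eq_append_filter]
  have hnil : (PySem.Set.ofList t).filter (fun y => !(PySem.Set.contains s y)) = [] := by
    rw [List.filter_eq_nil_iff]
    intro y hy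
    have hys : y ∈ s := h y ((PySem.Set.mem_ofList t y).mp hy)
    simp [hys]
  rw [hnil, List.append_nil]

theorem pv_init_getD {κ ν : Type} [BEq κ] [LawfulBEq κ] [DecidableEq κ] :
    ∀ (l : List (κ × ν)) (d : PySem.Dict κ (List ν)) (c : κ), d.getD c [] = [] →
      (l.foldl (fun d p => d.insert p.1 ([] : List ν)) d).getD c [] = [] := by
  intro l
  induction l with
  | nil => intro d c h; simpa using h
  | cons p ps ih =>
      intro d c h
      simp only [List.foldl_cons]
      apply ih
      rw [PySem.Dict.getD_insert]
      split <;> simp [h]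

theorem pv_fold_ins_nomem {κ ν : Type} [BEq κ] [LawfulBEq κ] [DecidableEq κ] (g : κ × ν → ν) :
    ∀ (l : List (κ × ν)) (d : PySem.Dict κ ν) (c : κ), (∀ p ∈ l, p.1 ≠ c) →
      (l.foldl (fun d p => d.insert p.1 (g p)) d).get? c = d.get? c := by
  intro l
  induction l with
  | nil => intro d c _; rfl
  | cons p ps ih =>
      intro d c h
      simp only [List.foldl_cons]
      rw [ih _ c (fun q hq => h q (List.mem_cons_of_mem _ hq))]
      exact PySem.Dict.get?_insert_of_ne _ _ (Ne.symm (h p (List.mem_cons_self ..)))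

theorem pv_fold_ins_mem {κ ν : Type} [BEq κ] [LawfulBEq κ] [DecidableEq κ] (g : κ × ν → ν) :
    ∀ (l : List (κ × ν)) (d : PySem.Dict κ ν) (c : κ) (v : ν), (l.map Prod.fst).Nodup →
      (c, v) ∈ l → (l.foldl (fun d p => d.insert p.1 (g p)) d).get? c = some (g (c, v)) := by
  intro l
  induction l with
  | nil => intro d c v _ h; cases h
  | cons p ps ih =>
      intro d c v hnd hm
      simp only [List.map_cons, List.nodup_cons] at hnd
      rcases List.mem_cons.mp hm with he | hm'
      · subst he
        simp only [List.foldl_cons]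
        rw [pv_fold_ins_nomem g ps _ c (fun q hq hqc => by
          apply hnd.1
          rw [← hqc]
          exact show q.1 ∈ List.map Prod.fst ps from List.mem_map_of_mem hq)]
        exact PySem.Dict.get?_insert_self ..
      · simp only [List.foldl_cons]
        exact ih _ c v hnd.2 hm'

-- core: one stable sort by number, then filtering a class, equals sorting the class's numbers
theorem pv_sort_filter (P : List (String × Int)) (c : String) :
    PySem.List.sorted ((P.filter (fun p => p.1 == c)).map (·.2)) (fun x => x) false =
      ((PySem.List.sorted P (fun p => p.2) false).filter (fun p => p.1 == c)).map (·.2) := by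
  apply PySem.List.sorted_id_eq_of_perm_of_pairwise
  · exact (((PySem.List.sorted_perm P (fun p => p.2) false).filter _).map _)
  · have hp : (PySem.List.sorted P (fun p => p.2) false).Pairwise (fun a b => a.2 ≤ b.2) :=
      PySem.List.sorted_pairwise P (fun p => p.2)
    exact List.pairwise_map.mpr (hp.filter _)

def pvP (cs : List Char) : List (String × Int) :=
  (PySem.List.pyRange 0 cs.length 2).map (pvF cs)

def pvD1 (cs : List Char) : PySem.Dict String (List Int) :=
  (pvP cs).foldl (fun d p => d.modify p.1 [] (· ++ [p.2])) PySem.Dict.empty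

def pvD2 (cs : List Char) : PySem.Dict String (List Int) :=
  (pvD1 cs).items.foldl
    (fun d p => d.insert p.1 (PySem.List.sorted p.2 (fun x => x) false)) (pvD1 cs)

def pvInit (cs : List Char) : PySem.Dict String (List Int) :=
  (pvP cs).foldl (fun d p => d.insert p.1 ([] : List Int)) PySem.Dict.empty

def pvDB (cs : List Char) : PySem.Dict String (List Int) :=
  (PySem.List.sorted (pvP cs) (fun p => p.2) false).foldl
    (fun d p => d.modify p.1 [] (· ++ [p.2])) (pvInit cs)

theorem pv_A_eq (s : String) : process_hand_tiles s = (pvD2 s.toList).items := by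
  simp only [process_hand_tiles, pvD2, pvD1, pvP, List.foldl_map]
  rfl

theorem pv_B_eq (s : String) : process_hand_tiles_alt s = (pvDB s.toList).items := by
  have hpairs : (PySem.List.pyRange 0 s.toList.length 2).foldl
      (fun acc i => acc ++ [pvF s.toList i]) [] = pvP s.toList := by
    rw [pv_foldl_push]; rfl
  simp only [process_hand_tiles_alt]
  rw [show (fun (acc : List (String × Int)) (i : Int) =>
        let num := (PySem.List.pyGet? s.toList i).getD ' '
        acc ++ [(String.mk [(PySem.List.pyGet? s.toList (i + 1)).getD ' '],
                 if num = '0' then (5 : Int)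
                 else (PySem.Int.ofStr? (String.mk [num])).getD 0)]) =
      (fun acc i => acc ++ [pvF s.toList i]) from rfl, hpairs]
  rfl

theorem pv_nd1 (cs : List Char) : (pvD1 cs).keys.Nodup := by
  unfold pvD1
  exact PySem.Dict.nodup_keys_foldl_modify_key (pvP cs) Prod.fst []
    (fun _ p v => v ++ [p.2]) PySem.Dict.empty (by simp)

theorem pv_keys1 (cs : List Char) :
    (pvD1 cs).keys = PySem.Set.ofList ((pvP cs).map Prod.fst) := by
  unfold pvD1
  rw [PySem.Dict.keys_foldl_modify_key (pvP cs) Prod.fst [] (fun _ p v => v ++ [p.2])]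
  simp [PySem.Set.update_nil_left]

theorem pv_g1 (cs : List Char) (c : String) :
    (pvD1 cs).getD c [] = ((pvP cs).filter (fun p => p.1 == c)).map (·.2) := by
  unfold pvD1
  rw [PySem.Dict.getD_foldl_modify_append]
  simp

theorem pv_nd2 (cs : List Char) : (pvD2 cs).keys.Nodup := by
  unfold pvD2
  exact PySem.Dict.nodup_keys_foldl_insert_key (pvD1 cs).items Prod.fst
    (fun _ p => PySem.List.sorted p.2 (fun x => x) false) (pvD1 cs) (pv_nd1 cs)

theorem pv_keys2 (cs : List Char) : (pvD2 cs).keys = (pvD1 cs).keys := by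
  unfold pvD2
  rw [PySem.Dict.keys_foldl_insert_key (pvD1 cs).items Prod.fst
    (fun _ p => PySem.List.sorted p.2 (fun x => x) false) (pvD1 cs)]
  exact pv_update_self _ _ (fun x h => h)

theorem pv_g2 (cs : List Char) (c : String) (v : List Int)
    (hm : (c, v) ∈ (pvD1 cs).items) :
    (pvD2 cs).getD c [] = PySem.List.sorted v (fun x => x) false := by
  have hget : (pvD2 cs).get? c = some (PySem.List.sorted v (fun x => x) false) := by
    unfold pvD2
    exact pv_fold_ins_mem (fun p => PySem.List.sorted p.2 (fun x => x) false)
      (pvD1 cs).items (pvD1 cs) c v (pv_nd1 cs) hm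
  rw [PySem.Dict.getD_eq_get?_getD, hget]; rfl

theorem pv_ndI (cs : List Char) : (pvInit cs).keys.Nodup := by
  unfold pvInit
  exact PySem.Dict.nodup_keys_foldl_insert_key (pvP cs) Prod.fst
    (fun _ _ => []) PySem.Dict.empty (by simp)

theorem pv_keysI (cs : List Char) :
    (pvInit cs).keys = PySem.Set.ofList ((pvP cs).map Prod.fst) := by
  unfold pvInit
  rw [PySem.Dict.keys_foldl_insert_key (pvP cs) Prod.fst (fun _ _ => [])]
  simp [PySem.Set.update_nil_left]

theorem pv_ndB (cs : List Char) : (pvDB cs).keys.Nodup := by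
  unfold pvDB
  exact PySem.Dict.nodup_keys_foldl_modify_key _ Prod.fst []
    (fun _ p v => v ++ [p.2]) (pvInit cs) (pv_ndI cs)

theorem pv_keysB (cs : List Char) : (pvDB cs).keys = (pvInit cs).keys := by
  unfold pvDB
  rw [PySem.Dict.keys_foldl_modify_key _ Prod.fst [] (fun _ p v => v ++ [p.2])]
  apply pv_update_self
  intro x hx
  rw [pv_keysI]
  rcases List.mem_map.mp hx with ⟨p, hp, he⟩
  exact (PySem.Set.mem_ofList _ _).mpr
    (List.mem_map.mpr ⟨p, ((PySem.List.sorted_perm (pvP cs) (fun p => p.2) false).mem_iff).mp hp, he⟩)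

theorem pv_gB (cs : List Char) (c : String) :
    (pvDB cs).getD c [] =
      ((PySem.List.sorted (pvP cs) (fun p => p.2) false).filter (fun p => p.1 == c)).map (·.2) := by
  have hI : (pvInit cs).getD c [] = [] := by
    unfold pvInit
    exact pv_init_getD (pvP cs) PySem.Dict.empty c (by simp)
  unfold pvDB
  rw [PySem.Dict.getD_foldl_modify_append, hI]
  simp

theorem pv_main (s : String) : process_hand_tiles s = process_hand_tiles_alt s := by
  rw [pv_A_eq, pv_B_eq]
  set cs := s.toList with hcs
  rw [PySem.Dict.items_eq_map_keys (pvD2 cs) (pv_nd2 cs) [],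
      PySem.Dict.items_eq_map_keys (pvDB cs) (pv_ndB cs) [],
      pv_keys2, pv_keys1, pv_keysB, pv_keysI]
  apply List.map_congr_left
  intro k hk
  have hk1 : k ∈ (pvD1 cs).keys := by rw [pv_keys1]; exact hk
  -- extract the (k, v) item of d1
  rcases List.mem_map.mp hk1 with ⟨p, hp, hpe⟩
  have hm : (k, p.2) ∈ (pvD1 cs).items := by
    have : p = (k, p.2) := by rw [← hpe]
    rw [← this]; exact hp
  have hv : (pvD1 cs).getD k [] = p.2 :=
    PySem.Dict.getD_of_mem_items (pvD1 cs) hm (pv_nd1 cs) []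
  have h2 : (pvD2 cs).getD k [] = PySem.List.sorted p.2 (fun x => x) false := pv_g2 cs k p.2 hm
  have hB : (pvDB cs).getD k [] =
      ((PySem.List.sorted (pvP cs) (fun p => p.2) false).filter (fun p => p.1 == k)).map (·.2) :=
    pv_gB cs k
  have hcore := pv_sort_filter (pvP cs) k
  have hv' : p.2 = ((pvP cs).filter (fun p => p.1 == k)).map (·.2) := by
    rw [← hv, pv_g1]
  refine Prod.ext rfl ?_
  simp only
  rw [h2, hB, hv', hcore]

-- ===== VERDICT (by name: the statement is the Claim_ definition above) =====
theorem process_hand_tiles_spec : Claim_equal_process_hand_tiles := by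
  intro s _ _
  unfold Spec_process_hand_tiles
  exact pv_main s
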